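-- pv_equiv track=rewrite | github.com/tjira/hazel | python/hazel.py | align
-- ===== SOURCE A (Python) =====
-- def align(arr1, arr2):
--     arr1, arr2, swaps = list(arr1), list(arr2), 0
--     for i in range(len(arr1)):
--         if arr1[i] in arr2 and arr1[i] != arr2[i]:
--             index = arr2.index(arr1[i])
--             arr2[i], arr2[index] = arr2[index], arr2[i]
--             swaps += 1
--     return tuple(arr1), tuple(arr2), swaps
-- ===== SOURCE B (Python) =====
-- def align(arr1, arr2):
--     # Zipper simulation: keep the already-processed prefix of arr2 ("done") and the
--     # unprocessed suffix ("todo") as two lists; each step commits one element from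
--     # todo to done, distinguishing steal-from-prefix and fetch-from-suffix.
--     done, todo, swaps = [], list(arr2), 0
--     for x in arr1:
--         if not todo:
--             break
--         y = todo[0]
--         if x == y:
--             done.append(y)
--             todo.pop(0)
--         elif x in done:
--             done[done.index(x)] = y
--             done.append(x)
--             todo.pop(0)
--             swaps += 1
--         elif x in todo:
--             todo[todo.index(x)] = y
--             done.append(x)
--             todo.pop(0)
--             swaps += 1
--         else:
--             done.append(y)
--             todo.pop(0)
--     return tuple(arr1), tuple(done + todo), swaps
-- ===== Notes on version B (the rewrite author's own statement) =====
-- stated objective: alternative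
-- what changed: B replaces A's in-place array with index arithmetic by a zipper traversal: it recurses over arr1 keeping arr2 split into a committed prefix and a remaining suffix, commits one element per step, and handles steal-from-prefix and fetch-from-suffix as separate cases instead of one generic swap.
import Mathlib
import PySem

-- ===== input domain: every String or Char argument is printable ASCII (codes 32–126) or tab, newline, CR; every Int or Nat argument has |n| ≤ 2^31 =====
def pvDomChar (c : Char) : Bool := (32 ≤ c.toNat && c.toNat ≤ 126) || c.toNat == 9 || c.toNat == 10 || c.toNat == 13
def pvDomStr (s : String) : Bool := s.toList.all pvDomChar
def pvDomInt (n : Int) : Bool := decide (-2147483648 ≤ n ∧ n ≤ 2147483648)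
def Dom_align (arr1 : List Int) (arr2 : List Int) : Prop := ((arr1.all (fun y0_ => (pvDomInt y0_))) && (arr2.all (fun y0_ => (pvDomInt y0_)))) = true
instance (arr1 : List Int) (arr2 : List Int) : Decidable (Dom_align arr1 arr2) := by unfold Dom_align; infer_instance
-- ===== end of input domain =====

-- B replaces A's in-place array updates with index arithmetic by a zipper traversal
-- (committed prefix + remaining suffix, separate steal-from-prefix / fetch-from-suffix
-- cases); objective: alternative structure, no speed claim.


-- ===== PORT A =====
-- loop body of A: `if arr1[i] in arr2 and arr1[i] != arr2[i]: index = arr2.index(arr1[i]); swap; swaps += 1`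
def alignStepA (arr1 : List Int) (st : List Int × Int) (i : Int) : List Int × Int :=
  match PySem.List.pyGet? arr1 i with
  | none => st            -- arr1[i]: in range for every i of the loop
  | some x =>
    if x ∈ st.1 then
      match PySem.List.pyGet? st.1 i with
      | none => st        -- arr2[i] raises IndexError in Python: outside Pre_align
      | some yi =>
        if x ≠ yi then
          match PySem.List.index? st.1 x with
          | none => st    -- unreachable: x ∈ arr2
          | some idx =>
            -- arr2[i], arr2[index] = arr2[index], arr2[i]
            let rhs := (PySem.List.pyGetD st.1 (idx : Int) 0, yi)
            (PySem.List.pySetD (PySem.List.pySetD st.1 i rhs.1) (idx : Int) rhs.2, st.2 + 1)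
        else st
    else st

def align (arr1 : List Int) (arr2 : List Int) : List Int × List Int × Int :=
  let r := (PySem.List.pyRange 0 (PySem.List.len arr1) 1).foldl (alignStepA arr1) (arr2, 0)
  (arr1, r.1, r.2)

-- ===== PORT B =====
-- the for-loop of Source B: state (done, todo, swaps); one element of arr1 per step
def alignGo : List Int → List Int → List Int → Int → List Int × Int
  | [], done, todo, swaps => (done ++ todo, swaps)
  | _ :: _, done, [], swaps => (done, swaps)          -- `if not todo: break`, then done + todo
  | x :: xs, done, y :: rest, swaps =>
    if x = y then
      alignGo xs (done ++ [y]) rest swaps             -- commit matching head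
    else
      match PySem.List.index? done x with             -- `x in done` + `done.index(x)`
      | some j =>                                     -- steal from committed prefix
        alignGo xs (PySem.List.pySetD done (j : Int) y ++ [x]) rest (swaps + 1)
      | none =>
        match PySem.List.index? (y :: rest) x with    -- `x in todo` + `todo.index(x)`
        | some k =>                                   -- fetch from suffix: set, then pop(0)
          alignGo xs (done ++ [x]) ((PySem.List.pySetD (y :: rest) (k : Int) y).tail) (swaps + 1)
        | none => alignGo xs (done ++ [y]) rest swaps -- x absent: commit head unchanged

def align_alt (arr1 : List Int) (arr2 : List Int) : List Int × List Int × Int :=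
  let r := alignGo arr1 [] arr2 0
  (arr1, r.1, r.2)

-- ===== PRECONDITION & SPEC =====
-- Pre_align excludes exactly the inputs on which A raises IndexError: some index i ≥ len(arr2)
-- with arr1[i] ∈ arr2 (membership in arr2, as a multiset, is invariant under A's swaps).
def Pre_align (arr1 : List Int) (arr2 : List Int) : Prop :=
  ∀ x ∈ arr1.drop arr2.length, x ∉ arr2
instance (arr1 : List Int) (arr2 : List Int) : Decidable (Pre_align arr1 arr2) := by
  unfold Pre_align; infer_instance
def pvWitness_align : List Int × List Int := ([3, 1, 2, 9], [1, 2, 3])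

def Spec_align (arr1 : List Int) (arr2 : List Int) (out : List Int × List Int × Int) : Prop := out = align_alt arr1 arr2
instance (arr1 : List Int) (arr2 : List Int) (out : List Int × List Int × Int) : Decidable (Spec_align arr1 arr2 out) := by unfold Spec_align; infer_instance

-- ===== CLAIM (what is proved, stated in full; the proofs are below) =====
def Claim_equal_align : Prop := ∀ (arr1 : List Int) (arr2 : List Int), Dom_align arr1 arr2 → Pre_align arr1 arr2 → Spec_align arr1 arr2 (align arr1 arr2)

-- ===== LEMMAS AND PROOFS =====

-- an element of l other than l[j] survives l.set j a
lemma mem_set_of_mem_ne {l : List Int} {v a : Int} {j : Nat} (hj : j < l.length)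
    (hv : v ∈ l) (hne : v ≠ l[j]) : v ∈ l.set j a := by
  obtain ⟨m, hm, he⟩ := List.mem_iff_getElem.mp hv
  have hmj : m ≠ j := by rintro rfl; exact hne he.symm
  exact List.mem_iff_getElem.mpr ⟨m, by simpa using hm, by rw [List.getElem_set, if_neg (fun hh => hmj hh.symm)]; exact he⟩

-- index? on an append whose left part misses the value
lemma index?_append_of_not_mem {l1 : List Int} (l2 : List Int) {v : Int} (h : v ∉ l1) :
    PySem.List.index? (l1 ++ l2) v = (PySem.List.index? l2 v).map (· + l1.length) := by
  induction l1 with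
  | nil => simp
  | cons a l1 ih =>
    have ha : a ≠ v := fun hh => h (hh ▸ List.mem_cons_self)
    have h' : v ∉ l1 := fun hh => h (List.mem_cons_of_mem _ hh)
    rw [List.cons_append, PySem.List.index?_cons_of_ne _ ha, ih h', Option.map_map]
    simp [Function.comp_def, List.length_cons, Nat.add_assoc]

-- once every remaining arr1 element is absent from a2, A's loop does nothing
lemma skip_all (arr1 : List Int) :
    ∀ (m k : Nat) (a2 : List Int) (swaps : Int), m + k = arr1.length →
    (∀ z ∈ arr1.drop k, z ∉ a2) →
    (PySem.List.pyRange (k : Int) (arr1.length : Int) 1).foldl (alignStepA arr1) (a2, swaps)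
      = (a2, swaps) := by
  intro m
  induction m with
  | zero =>
    intro k a2 swaps hmk _
    rw [PySem.List.pyRange_one_eq_nil (by exact_mod_cast (by omega : arr1.length ≤ k))]
    rfl
  | succ m ih =>
    intro k a2 swaps hmk hz
    have hk : k < arr1.length := by omega
    rw [PySem.List.pyRange_one_cons (by exact_mod_cast hk)]
    simp only [List.foldl_cons]
    have hA : PySem.List.pyGet? arr1 (k : Int) = some (arr1[k]) := by
      rw [PySem.List.pyGet?_natCast]; exact List.getElem?_eq_getElem hk
    have hmem : arr1[k] ∈ arr1.drop k := by
      refine List.mem_iff_getElem.mpr ⟨0, by simp [List.length_drop]; omega, ?_⟩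
      simp
    have hstep : alignStepA arr1 (a2, swaps) (k : Int) = (a2, swaps) := by
      simp only [alignStepA, hA]
      rw [if_neg (hz _ hmem)]
    rw [hstep]
    have hcast : ((k : Int) + 1) = (((k + 1 : Nat)) : Int) := by push_cast; ring
    rw [hcast]
    exact ih (k + 1) a2 swaps (by omega) (fun z hzz => hz z (by rw [← List.tail_drop] at hzz; exact List.tail_subset _ hzz))

-- main simulation: A's indexed loop over done.length ≤ i < len arr1 agrees with B's zipper
lemma sim (arr1 arr2 : List Int) (hpre : Pre_align arr1 arr2) :
    ∀ (xs done todo : List Int) (swaps : Int),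
    xs = arr1.drop done.length →
    done.length + todo.length = arr2.length →
    (∀ v, v ∈ done ++ todo ↔ v ∈ arr2) →
    (PySem.List.pyRange ((done.length : Nat) : Int) (arr1.length : Int) 1).foldl
        (alignStepA arr1) (done ++ todo, swaps)
      = alignGo xs done todo swaps := by
  intro xs
  induction xs with
  | nil =>
    intro done todo swaps hxs _ _
    have h0 : (0 : Nat) = arr1.length - done.length := by
      simpa using congrArg List.length hxs
    have hle : arr1.length ≤ done.length := by omega
    rw [PySem.List.pyRange_one_eq_nil (by exact_mod_cast hle)]
    rfl
  | cons x xs ih =>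
    intro done todo swaps hxs hlen hmem
    have hx0 : arr1[done.length]? = some x := by
      have h1 : (arr1.drop done.length)[0]? = some x := by rw [← hxs]; rfl
      simpa [List.getElem?_drop] using h1
    have hd : done.length < arr1.length := (List.getElem?_eq_some_iff.mp hx0).1
    have hxd : arr1[done.length] = x := by
      have h2 := List.getElem?_eq_getElem hd
      rw [hx0] at h2
      exact (Option.some_inj.mp h2).symm
    have hxs' : xs = arr1.drop (done.length + 1) := by
      have h3 := congrArg List.tail hxs
      rw [List.tail_drop] at h3
      simpa using h3
    have hA : PySem.List.pyGet? arr1 ((done.length : Nat) : Int) = some x := by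
      rw [PySem.List.pyGet?_natCast, hx0]
    rw [PySem.List.pyRange_one_cons (by exact_mod_cast hd)]
    simp only [List.foldl_cons]
    have hcast : (((done.length : Nat) : Int) + 1) = (((done.length + 1 : Nat)) : Int) := by
      push_cast; ring
    match todo with
    | [] =>
      -- Source B: `if not todo: break`; A skips all remaining i (Pre_align)
      have hd2 : done.length = arr2.length := by simpa using hlen
      have hz : ∀ z ∈ arr1.drop done.length, z ∉ done := by
        intro z hzz hzd
        exact (hpre z (hd2 ▸ hzz)) ((hmem z).mp (by simpa using hzd))
      have := skip_all arr1 (arr1.length - done.length) done.length done swaps (by omega)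
        hz
      rw [PySem.List.pyRange_one_cons (by exact_mod_cast hd)] at this
      simp only [List.foldl_cons] at this
      simpa [alignGo] using this
    | y :: rest =>
      have hy : PySem.List.pyGet? (done ++ y :: rest) ((done.length : Nat) : Int) = some y :=
        PySem.List.pyGet?_append_length done rest y
      by_cases hxy : x = y
      · -- heads match: both sides just move on
        subst hxy
        have hstep : alignStepA arr1 (done ++ x :: rest, swaps) ((done.length : Nat) : Int)
            = (done ++ x :: rest, swaps) := by
          simp only [alignStepA, hA, hy]
          rw [if_pos (by simp), if_neg (by simp)]
        rw [hstep, hcast]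
        have := ih (done ++ [x]) rest swaps (by simpa using hxs')
          (by simp only [List.length_append, List.length_cons, List.length_nil] at hlen ⊢; omega)
          (by intro v; rw [← hmem v]; simp)
        simp only [List.length_append, List.length_cons, List.length_nil] at this ⊢
        rw [List.append_assoc] at this
        simpa [alignGo] using this
      · by_cases hxdone : x ∈ done
        · -- steal from the committed prefix
          obtain ⟨j, hj⟩ := Option.isSome_iff_exists.mp
            ((PySem.List.index?_isSome_iff done x).mpr hxdone)
          obtain ⟨hjlt, hjx, -⟩ := PySem.List.getElem_of_index?_eq_some hj
          have hidx : PySem.List.index? (done ++ y :: rest) x = some j :=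
            (PySem.List.index?_append_of_mem (y :: rest) hxdone).trans hj
          have hgd : PySem.List.pyGetD (done ++ y :: rest) ((j : Nat) : Int) 0 = x := by
            rw [PySem.List.pyGetD_natCast, List.getD_eq_getElem _ _ (by simp; omega),
              List.getElem_append_left hjlt, hjx]
          have hset : (PySem.List.pySetD (PySem.List.pySetD (done ++ y :: rest)
              ((done.length : Nat) : Int) x) ((j : Nat) : Int) y)
              = done.set j y ++ x :: rest := by
            rw [PySem.List.pySetD_natCast, PySem.List.pySetD_natCast,
              List.set_append_right _ _ (le_refl _), Nat.sub_self]
            simp only [List.set_cons_zero]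
            rw [List.set_append_left _ _ hjlt]
          have hstep : alignStepA arr1 (done ++ y :: rest, swaps) ((done.length : Nat) : Int)
              = (done.set j y ++ x :: rest, swaps + 1) := by
            simp only [alignStepA, hA, hy]
            rw [if_pos (by simp [hxdone]), if_pos (by simpa using hxy), hidx]
            simp only [hgd, hset]
          rw [hstep, hcast]
          have hmem' : ∀ v, v ∈ (done.set j y ++ [x]) ++ rest ↔ v ∈ arr2 := by
            intro v
            rw [← hmem v]
            simp only [List.mem_append, List.mem_cons, List.not_mem_nil, or_false]
            constructor
            · rintro ((hv | rfl) | hv)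
              · rcases List.mem_or_eq_of_mem_set hv with hv | rfl
                · exact Or.inl hv
                · exact Or.inr (Or.inl rfl)
              · exact Or.inl hxdone
              · exact Or.inr (Or.inr hv)
            · rintro (hv | (rfl | hv))
              · by_cases hvx : v = x
                · exact Or.inl (Or.inr hvx)
                · exact Or.inl (Or.inl (mem_set_of_mem_ne hjlt hv (by rw [hjx]; exact hvx)))
              · exact Or.inl (Or.inl (List.mem_iff_getElem.mpr ⟨j, by simpa using hjlt,
                  by rw [List.getElem_set, if_pos rfl]⟩))
              · exact Or.inr hv
          have := ih (PySem.List.pySetD done ((j : Nat) : Int) y ++ [x]) rest (swaps + 1)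
            (by simpa [PySem.List.pySetD_natCast] using hxs')
            (by simp only [PySem.List.pySetD_natCast, List.length_append, List.length_set,
              List.length_cons, List.length_nil] at hlen ⊢; omega)
            (by simpa [PySem.List.pySetD_natCast] using hmem')
          simp only [PySem.List.pySetD_natCast, List.length_append, List.length_set,
            List.length_cons, List.length_nil] at this ⊢
          rw [List.append_assoc] at this
          simp only [List.singleton_append] at this
          rw [this]
          simp only [alignGo]
          rw [if_neg hxy, hj]
          simp [PySem.List.pySetD_natCast]
        · by_cases hxrest : x ∈ rest
          · -- fetch from the suffix
            obtain ⟨m, hm⟩ := Option.isSome_iff_exists.mp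
              ((PySem.List.index?_isSome_iff rest x).mpr hxrest)
            obtain ⟨hmlt, hmx, -⟩ := PySem.List.getElem_of_index?_eq_some hm
            have hcons : PySem.List.index? (y :: rest) x = some (m + 1) := by
              rw [PySem.List.index?_cons_of_ne _ (fun hh => hxy hh.symm), hm]; rfl
            have hidx : PySem.List.index? (done ++ y :: rest) x
                = some (m + 1 + done.length) := by
              rw [index?_append_of_not_mem _ hxdone, hcons]; rfl
            have hgd : PySem.List.pyGetD (done ++ y :: rest)
                (((m + 1 + done.length : Nat)) : Int) 0 = x := by
              rw [PySem.List.pyGetD_natCast,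
                List.getD_eq_getElem _ _ (by simp; omega)]
              rw [List.getElem_append_right (by omega)]
              simp only [List.getElem_cons]
              rw [dif_neg (by omega)]
              have he : m + 1 + done.length - done.length - 1 = m := by omega
              simp only [he]
              exact hmx
            have hset : (PySem.List.pySetD (PySem.List.pySetD (done ++ y :: rest)
                ((done.length : Nat) : Int) x) (((m + 1 + done.length : Nat)) : Int) y)
                = done ++ x :: rest.set m y := by
              rw [PySem.List.pySetD_natCast, PySem.List.pySetD_natCast,
                List.set_append_right _ _ (le_refl _), Nat.sub_self]
              simp only [List.set_cons_zero]
              rw [List.set_append_right _ _ (by omega)]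
              have : m + 1 + done.length - done.length = m + 1 := by omega
              rw [this, List.set_cons_succ]
            have hstep : alignStepA arr1 (done ++ y :: rest, swaps) ((done.length : Nat) : Int)
                = (done ++ x :: rest.set m y, swaps + 1) := by
              simp only [alignStepA, hA, hy]
              rw [if_pos (by simp [hxrest]), if_pos (by simpa using hxy), hidx]
              simp only [hgd, hset]
            rw [hstep, hcast]
            have hmem' : ∀ v, v ∈ (done ++ [x]) ++ rest.set m y ↔ v ∈ arr2 := by
              intro v
              rw [← hmem v]
              simp only [List.mem_append, List.mem_cons, List.not_mem_nil, or_false]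
              constructor
              · rintro ((hv | rfl) | hv)
                · exact Or.inl hv
                · exact Or.inr (Or.inr hxrest)
                · rcases List.mem_or_eq_of_mem_set hv with hv | rfl
                  · exact Or.inr (Or.inr hv)
                  · exact Or.inr (Or.inl rfl)
              · rintro (hv | (rfl | hv))
                · exact Or.inl (Or.inl hv)
                · exact Or.inr (List.mem_iff_getElem.mpr ⟨m, by simpa using hmlt,
                    by rw [List.getElem_set, if_pos rfl]⟩)
                · by_cases hvx : v = x
                  · exact Or.inl (Or.inr hvx)
                  · exact Or.inr (mem_set_of_mem_ne hmlt hv (by rw [hmx]; exact hvx))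
            have htail : (PySem.List.pySetD (y :: rest) (((m + 1 : Nat)) : Int) y).tail
                = rest.set m y := by
              rw [PySem.List.pySetD_natCast, List.set_cons_succ]
              rfl
            have := ih (done ++ [x]) (rest.set m y) (swaps + 1)
              (by simpa using hxs')
              (by simp only [List.length_append, List.length_set, List.length_cons,
                List.length_nil] at hlen ⊢; omega) hmem'
            simp only [List.length_append, List.length_cons, List.length_nil] at this ⊢
            rw [List.append_assoc] at this
            simp only [List.singleton_append] at this
            rw [this]
            simp only [alignGo]
            rw [if_neg hxy]
            rw [(PySem.List.index?_eq_none_iff done x).mpr hxdone, hcons]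
            simp only [Nat.cast_add, Nat.cast_one] at htail ⊢
            rw [htail]
          · -- x occurs nowhere: both sides skip / commit unchanged
            have hnot : x ∉ done ++ y :: rest := by
              simp only [List.mem_append, List.mem_cons]
              rintro (h | h | h)
              · exact hxdone h
              · exact hxy h
              · exact hxrest h
            have hstep : alignStepA arr1 (done ++ y :: rest, swaps) ((done.length : Nat) : Int)
                = (done ++ y :: rest, swaps) := by
              simp only [alignStepA, hA]
              rw [if_neg hnot]
            rw [hstep, hcast]
            have := ih (done ++ [y]) rest swaps (by simpa using hxs')
              (by simp only [List.length_append, List.length_cons, List.length_nil] at hlen ⊢; omega)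
              (by intro v; rw [← hmem v]; simp)
            simp only [List.length_append, List.length_cons, List.length_nil] at this ⊢
            rw [List.append_assoc] at this
            simp only [List.singleton_append] at this
            rw [this]
            simp only [alignGo]
            rw [if_neg hxy, (PySem.List.index?_eq_none_iff done x).mpr hxdone,
              (PySem.List.index?_eq_none_iff (y :: rest) x).mpr (by
                simp only [List.mem_cons]
                rintro (h | h)
                · exact hxy h
                · exact hxrest h)]

-- ===== VERDICT (by name: the statement is the Claim_ definition above) =====
theorem align_spec : Claim_equal_align := by
  intro arr1 arr2 _hdom hpre
  unfold Spec_align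
  have := sim arr1 arr2 hpre arr1 [] arr2 0 (by simp) (by simp) (by simp)
  simp only [List.length_nil, Nat.cast_zero, List.nil_append] at this
  simp only [align, align_alt, PySem.List.len_eq]
  rw [this]
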